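-- pv_equiv track=rewrite | github.com/SkyeWint/TwitchIntegration | audio_modules/stream_TTS.py | _split_TTS_parts
-- ===== SOURCE A (Python) =====
-- from enum import Enum
--
-- class Voice_Codes(Enum):
--
--     PYTTS_MALE = "[m]"
--     PYTTS_FEMALE = "[f]"
--     GTTS = "[g]"
--     RANDOM = "[r]"
--
-- def _split_TTS_parts(text:"str") -> list:
--     text_words = text.split()
--
--     text_parts = []
--     text_part = ""
--
--     for i in range(len(text_words)):
--
--         if text_words[i] in [k.value for k in Voice_Codes]:
--
--             # Prevents a blank initial fragment in the list. Otherwise, adds existing fragment into list if a voice code is detected.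
--             # The new fragment will then begin by appending the voice code as the first piece of the TTS part.
--             if text_part != "":
--                 text_parts.append(text_part)
--             text_part = ""
--
--         text_part = text_part + text_words[i] + " "
--
--     text_parts.append(text_part)
--
--     return text_parts
-- ===== SOURCE B (Python) =====
-- from enum import Enum
--
-- class Voice_Codes(Enum):
--
--     PYTTS_MALE = "[m]"
--     PYTTS_FEMALE = "[f]"
--     GTTS = "[g]"
--     RANDOM = "[r]"
--
-- def _split_TTS_parts(text: "str") -> list:
--     # Build the parts back-to-front: scan the words from the right, prepending each
--     # word to the current (first) part; a voice-code word starts a part, so after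
--     # prepending it we open a fresh empty part in front. A blank leading fragment
--     # (text starting with a voice code) is dropped, matching the intended output.
--     codes = {v.value for v in Voice_Codes}
--     parts = [""]
--     for word in reversed(text.split()):
--         parts[0] = word + " " + parts[0]
--         if word in codes:
--             parts.insert(0, "")
--     if len(parts) > 1 and parts[0] == "":
--         parts.pop(0)
--     return parts
-- ===== Notes on version B (the rewrite author's own statement) =====
-- stated objective: alternative
-- what changed: Replaces A's left-to-right index loop with a flush-on-code string accumulator by a right-to-left scan over the words that builds the parts list back-to-front, prepending each word to the head part and opening a fresh part after each voice code, with a final drop of a blank leading fragment.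
import Mathlib
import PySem

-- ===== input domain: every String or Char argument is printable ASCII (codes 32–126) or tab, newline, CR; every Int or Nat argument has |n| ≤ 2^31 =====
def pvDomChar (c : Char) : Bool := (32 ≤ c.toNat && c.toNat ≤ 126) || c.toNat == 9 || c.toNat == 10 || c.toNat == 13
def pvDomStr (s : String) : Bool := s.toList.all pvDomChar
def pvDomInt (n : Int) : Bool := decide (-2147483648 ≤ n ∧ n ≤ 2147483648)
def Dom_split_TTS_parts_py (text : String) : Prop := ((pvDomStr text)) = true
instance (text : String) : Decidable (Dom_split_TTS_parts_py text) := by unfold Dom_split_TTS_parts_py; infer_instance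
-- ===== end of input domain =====

-- B replaces A's left-to-right flush-accumulator loop by a right-to-left scan that
-- builds the parts back-to-front (prepend to head, open a new part after each code);
-- objective: alternative decomposition, same cost.

-- ===== PORT A =====
-- [k.value for k in Voice_Codes]
def pyVoiceCodeValues : List String := ["[m]", "[f]", "[g]", "[r]"]

def split_TTS_parts_py (text : String) : List String :=
  let text_words := PySem.Str.split₀ text
  let st :=
    (PySem.List.pyRange 0 (text_words.length : Int) 1).foldl
      (fun (st : List String × String) i =>
        let w := PySem.List.pyGetD text_words i ""   -- index always in range(len), so exact
        let st1 :=
          if pyVoiceCodeValues.contains w then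
            ((if st.2 ≠ "" then st.1 ++ [st.2] else st.1), "")
          else st
        (st1.1, st1.2 ++ w ++ " "))
      ([], "")
  st.1 ++ [st.2]

-- ===== PORT B =====
-- {v.value for v in Voice_Codes}
def pyVoiceCodeSet : PySem.Set String := PySem.Set.ofList ["[m]", "[f]", "[g]", "[r]"]

-- one iteration of B's loop body; 'parts' is never [] (starts as [""], only grows),
-- so headD/tail are exact for Python's parts[0]
def altStep (parts : List String) (word : String) : List String :=
  let parts' := (word ++ " " ++ parts.headD "") :: parts.tail
  if pyVoiceCodeSet.contains word then "" :: parts' else parts'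

def split_TTS_parts_py_alt (text : String) : List String :=
  let parts := (PySem.Str.split₀ text).reverse.foldl altStep [""]
  if 1 < parts.length ∧ parts.headD "" = "" then parts.tail else parts

-- ===== PRECONDITION & SPEC =====
def Spec_split_TTS_parts_py (text : String) (out : List String) : Prop := out = split_TTS_parts_py_alt text
instance (text : String) (out : List String) : Decidable (Spec_split_TTS_parts_py text out) := by unfold Spec_split_TTS_parts_py; infer_instance

-- ===== CLAIM (what is proved, stated in full; the proofs are below) =====
def Claim_equal_split_TTS_parts_py : Prop := ∀ (text : String), Dom_split_TTS_parts_py text → Spec_split_TTS_parts_py text (split_TTS_parts_py text)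

-- ===== LEMMAS AND PROOFS =====

-- A's loop body, named for the proofs
def aStep (st : List String × String) (w : String) : List String × String :=
  let st1 :=
    if pyVoiceCodeValues.contains w then
      ((if st.2 ≠ "" then st.1 ++ [st.2] else st.1), "")
    else st
  (st1.1, st1.2 ++ w ++ " ")

-- glue cur l: what A's final 'parts ++ [part]' adds beyond the already-flushed parts,
-- expressed on B's back-to-front result l for the remaining words
def glueP (cur : String) (l : List String) : List String :=
  if cur = "" then (if 1 < l.length ∧ l.headD "" = "" then l.tail else l)
  else (cur ++ l.headD "") :: l.tail

theorem coreB_ne_nil (ws : List String) : ws.foldr (fun w l => altStep l w) [""] ≠ [] := by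
  cases ws with
  | nil => simp
  | cons w ws => simp only [List.foldr, altStep]; split <;> simp

theorem append_space_ne_empty (a b : String) : a ++ (" " ++ b) ≠ "" := by
  intro h
  have := congrArg String.length h
  simp [String.length_append] at this

theorem lemA (ws : List String) (parts : List String) (cur : String) :
    (ws.foldl aStep (parts, cur)).1 ++ [(ws.foldl aStep (parts, cur)).2]
      = parts ++ glueP cur (ws.foldr (fun w l => altStep l w) [""]) := by
  induction ws generalizing parts cur with
  | nil =>
    by_cases h : cur = "" <;> simp [glueP, h]
  | cons w ws ih =>
    obtain ⟨p, rest, hpr⟩ : ∃ p rest, ws.foldr (fun w l => altStep l w) [""] = p :: rest := by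
      cases hc : ws.foldr (fun w l => altStep l w) [""] with
      | nil => exact absurd hc (coreB_ne_nil ws)
      | cons p rest => exact ⟨p, rest, rfl⟩
    have hset : pyVoiceCodeSet = pyVoiceCodeValues := by decide
    rw [List.foldl_cons, ih]
    simp only [List.foldr]
    rw [hpr]
    simp only [altStep, aStep, hset]
    by_cases hw : w ∈ pyVoiceCodeValues <;> by_cases h : cur = "" <;>
      simp [hw, h, glueP, append_space_ne_empty, String.append_assoc]

-- ===== VERDICT (by name: the statement is the Claim_ definition above) =====
theorem split_TTS_parts_py_spec : Claim_equal_split_TTS_parts_py := by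
  intro text _
  have hb := PySem.List.foldl_pyRange_zero_pyGetD' (PySem.Str.split₀ text) ""
      aStep ([], "")
  simp only [aStep] at hb
  unfold Spec_split_TTS_parts_py
  simp only [split_TTS_parts_py, split_TTS_parts_py_alt]
  rw [List.foldl_reverse, hb, lemA]
  simp [glueP]
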